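-- pv_equiv track=rewrite | github.com/heeji289/elice_study | limhizy15/implementation/pro_17681.py | solution
-- ===== SOURCE A (Python) =====
-- def convert2binary(n, number):
--     converted = ''
--     while number != 0:
--         converted = str(number % 2) + converted
--         number = number // 2
--
--     if len(converted) != n:
--         converted = '0' * (n - len(converted)) + converted
--     return converted
--
-- def solution(n, arr1, arr2):
--     answer = []
--
--     a1 = [[0] * n for _ in range(n)]
--     a2 = [[0] * n for _ in range(n)]
--
--     for i in range(n):
--         binary = convert2binary(n, arr1[i])
--         for j in range(n):
--             a1[i][j] = int(binary[j])
--
--     for i in range(n):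
--         binary = convert2binary(n, arr2[i])
--         for j in range(n):
--             a2[i][j] = int(binary[j])
--
--     for i in range(n):
--         temp = ''
--         for j in range(n):
--             _or = a1[i][j] | a2[i][j]
--             if _or == 0:
--                 temp += ' '
--             else:
--                 temp += '#'
--         answer.append(temp)
--
--     return answer
-- ===== SOURCE B (Python) =====
-- def solution(n, arr1, arr2):
--     return [''.join('#' if c == '1' else ' ' for c in format(arr1[i] | arr2[i], 'b').zfill(n))
--             for i in range(n)]
-- ===== Notes on version B (the rewrite author's own statement) =====
-- stated objective: idiomatic
-- what changed: B replaces A's hand-rolled binary conversion, two n-by-n integer grids and per-bit extraction loops with one integer OR plus a binary-format/zfill/char-map pass per row; Pre_ restricts to the task's natural domain (n <= len(arr1), len(arr2), used values in [0, 2^n)): outside it A raises IndexError or loops forever on negatives, and on over-wide values (>= 2^n) neither A's fixed-width top-bits row nor B's over-long row is specified.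
-- outside the precondition, e.g. on solution(1, [2], [1]): A returns ['#'], B returns ['##']
import Mathlib
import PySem

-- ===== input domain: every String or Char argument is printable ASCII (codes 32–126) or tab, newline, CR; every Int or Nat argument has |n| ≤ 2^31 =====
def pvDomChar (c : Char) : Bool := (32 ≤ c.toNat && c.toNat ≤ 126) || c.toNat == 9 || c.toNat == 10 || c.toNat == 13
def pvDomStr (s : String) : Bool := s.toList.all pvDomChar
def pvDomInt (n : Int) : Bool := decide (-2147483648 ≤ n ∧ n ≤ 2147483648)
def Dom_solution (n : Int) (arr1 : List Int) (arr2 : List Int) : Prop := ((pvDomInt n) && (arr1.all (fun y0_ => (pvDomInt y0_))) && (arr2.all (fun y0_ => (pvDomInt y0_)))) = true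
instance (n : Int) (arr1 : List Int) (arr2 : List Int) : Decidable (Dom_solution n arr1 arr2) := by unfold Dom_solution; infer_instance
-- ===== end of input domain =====

-- B replaces A's two n×n integer grids and per-bit loops by one integer OR + binary-format + char-map per row (idiomatic).


-- ===== PORT A =====
-- the while-loop of convert2binary; fuel number.toNat+1 suffices since number halves
-- each iteration (on negative number Python diverges; such inputs are outside Pre_).
def conv2loop : Nat → Int → List Char → List Char
  | 0, _, conv => conv
  | fuel+1, number, conv =>
      if number ≠ 0 then
        conv2loop fuel (PySem.Int.floordiv number 2) (PySem.Int.toChars (PySem.Int.mod number 2) ++ conv)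
      else conv

-- strings are carried as List Char (PySem.Chars convention); rows become String.mk at the end
def convert2binary (n : Int) (number : Int) : List Char :=
  let converted := conv2loop (number.toNat + 1) number []
  if (converted.length : Int) ≠ n then
    List.replicate (n - (converted.length : Int)).toNat '0' ++ converted
  else converted

def solution (n : Int) (arr1 : List Int) (arr2 : List Int) : List String :=
  -- a1[i][j] = int(binary[j]); arr1[i] / binary[j] raise outside Pre_: total forms with defaults
  let a1 := (PySem.List.pyRange 0 n 1).map (fun i =>
    let binary := convert2binary n (PySem.List.pyGetD arr1 i 0)
    (PySem.List.pyRange 0 n 1).map (fun j =>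
      ((PySem.List.pyGet? binary j).bind (fun c => PySem.Int.ofChars? [c])).getD 0))
  let a2 := (PySem.List.pyRange 0 n 1).map (fun i =>
    let binary := convert2binary n (PySem.List.pyGetD arr2 i 0)
    (PySem.List.pyRange 0 n 1).map (fun j =>
      ((PySem.List.pyGet? binary j).bind (fun c => PySem.Int.ofChars? [c])).getD 0))
  (PySem.List.pyRange 0 n 1).map (fun i =>
    String.mk ((PySem.List.pyRange 0 n 1).map (fun j =>
      let orv := PySem.Int.bor (PySem.List.pyGetD (PySem.List.pyGetD a1 i []) j 0)
                               (PySem.List.pyGetD (PySem.List.pyGetD a2 i []) j 0)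
      if orv = 0 then ' ' else '#')))

-- ===== PORT B =====
def solution_alt (n : Int) (arr1 : List Int) (arr2 : List Int) : List String :=
  -- arr1[i] / arr2[i] raise outside Pre_: total forms with defaults, as in port A
  (PySem.List.pyRange 0 n 1).map (fun i =>
    String.mk ((PySem.Chars.zfill
        (PySem.Int.toBinChars (PySem.Int.bor (PySem.List.pyGetD arr1 i 0) (PySem.List.pyGetD arr2 i 0))) n).map
      (fun c => if c = '1' then '#' else ' ')))

-- ===== PRECONDITION & SPEC =====
-- Pre_ restricts to the task's natural domain (n-bit map rows): outside it A raises IndexError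
-- (an array shorter than n > 0), loops forever (a negative used value), or — on used values ≥ 2^n,
-- where neither output is specified — A returns a fixed-width row read from the value's top n bits
-- while B returns an over-long row; both are artefacts of malformed input.
def Pre_solution (n : Int) (arr1 : List Int) (arr2 : List Int) : Prop :=
  n ≤ (arr1.length : Int) ∧ n ≤ (arr2.length : Int) ∧
  (∀ x ∈ arr1.take n.toNat, 0 ≤ x ∧ x < 2 ^ n.toNat) ∧
  (∀ x ∈ arr2.take n.toNat, 0 ≤ x ∧ x < 2 ^ n.toNat)
instance (n : Int) (arr1 : List Int) (arr2 : List Int) : Decidable (Pre_solution n arr1 arr2) := by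
  unfold Pre_solution; infer_instance
def pvWitness_solution : Int × List Int × List Int := (2, [1, 2], [2, 3])

def Spec_solution (n : Int) (arr1 : List Int) (arr2 : List Int) (out : List String) : Prop := out = solution_alt n arr1 arr2
instance (n : Int) (arr1 : List Int) (arr2 : List Int) (out : List String) : Decidable (Spec_solution n arr1 arr2 out) := by unfold Spec_solution; infer_instance

-- ===== CLAIM (what is proved, stated in full; the proofs are below) =====
def Claim_equal_solution : Prop := ∀ (n : Int) (arr1 : List Int) (arr2 : List Int), Dom_solution n arr1 arr2 → Pre_solution n arr1 arr2 → Spec_solution n arr1 arr2 (solution n arr1 arr2)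
-- ===== LEMMAS AND PROOFS =====

def rawBin : Nat → List Char
  | 0 => []
  | (m+1) => rawBin ((m+1)/2) ++ [Nat.digitChar ((m+1) % 2)]
decreasing_by exact Nat.div_lt_self (Nat.succ_pos m) (by omega)
def fixedBits (k m : Nat) : List Char :=
  (List.range k).map (fun j => if m.testBit (k-1-j) then '1' else '0')
theorem rawBin_pos (m : Nat) (h : 0 < m) :
    rawBin m = rawBin (m/2) ++ [Nat.digitChar (m % 2)] := by
  cases m with
  | zero => omega
  | succ m => rw [rawBin]

theorem length_rawBin_le (k : Nat) : ∀ m, m < 2^k → (rawBin m).length ≤ k := by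
  induction k with
  | zero => intro m hm; interval_cases m; simp [rawBin]
  | succ k ih =>
    intro m hm
    rcases Nat.eq_zero_or_pos m with h0 | h0
    · subst h0; simp [rawBin]
    · rw [rawBin_pos m h0]
      have := ih (m/2) (by omega)
      simp; omega

theorem fixedBits_zero (k : Nat) : fixedBits k 0 = List.replicate k '0' := by
  simp [fixedBits, Nat.zero_testBit, List.map_const']

theorem fixedBits_succ (k m : Nat) :
    fixedBits (k+1) m = fixedBits k (m/2) ++ [if m.testBit 0 then '1' else '0'] := by
  unfold fixedBits
  rw [List.range_succ, List.map_append]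
  congr 1
  · apply List.map_congr_left
    intro j hj
    simp at hj
    rw [show k+1-1-j = (k-1-j)+1 by omega, ← Nat.testBit_div_two]
  · simp

theorem pad_rawBin (k : Nat) : ∀ m, m < 2^k →
    List.replicate (k - (rawBin m).length) '0' ++ rawBin m = fixedBits k m := by
  induction k with
  | zero => intro m hm; interval_cases m; simp [rawBin, fixedBits]
  | succ k ih =>
    intro m hm
    rw [fixedBits_succ]
    rcases Nat.eq_zero_or_pos m with h0 | h0
    · subst h0
      rw [show (0:Nat)/2 = 0 by omega, ← ih 0 Nat.one_le_two_pow]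
      simp [rawBin, List.replicate_succ']
    · rw [rawBin_pos m h0]
      have hd : Nat.digitChar (m % 2) = if m.testBit 0 then '1' else '0' := by
        rcases Nat.mod_two_eq_zero_or_one m with h | h <;>
          simp [h, Nat.testBit_zero, Nat.digitChar]
      have ih2 := ih (m/2) (by omega)
      rw [← ih2, hd]
      simp only [List.length_append, List.length_singleton]
      rw [show k + 1 - ((rawBin (m/2)).length + 1) = k - (rawBin (m/2)).length by omega]
      simp [List.append_assoc]

theorem conv2loop_eq (fuel : Nat) : ∀ m acc, m < fuel →
    conv2loop fuel ((m : Nat) : Int) acc = rawBin m ++ acc := by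
  induction fuel with
  | zero => omega
  | succ fuel ih =>
    intro m acc hm
    rcases Nat.eq_zero_or_pos m with h0 | h0
    · subst h0; simp [conv2loop, rawBin]
    · rw [conv2loop, if_pos (by exact_mod_cast (by omega : ¬ (m:Int) = 0))]
      rw [show PySem.Int.floordiv (m:Int) 2 = ((m/2 : Nat) : Int) from
            by exact_mod_cast PySem.Int.floordiv_natCast m 2,
          show PySem.Int.mod (m:Int) 2 = ((m % 2 : Nat) : Int) from
            by exact_mod_cast PySem.Int.mod_natCast m 2]
      have htc : PySem.Int.toChars ((m % 2 : Nat) : Int) = [Nat.digitChar (m % 2)] := by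
        rcases Nat.mod_two_eq_zero_or_one m with h | h <;> rw [h] <;> decide
      rw [htc, ih (m/2) _ (by omega), rawBin_pos m h0]
      simp

theorem toDigitsCore_eq (fuel : Nat) : ∀ m acc, m < fuel →
    Nat.toDigitsCore 2 fuel m acc = (if m = 0 then ['0'] else rawBin m) ++ acc := by
  induction fuel with
  | zero => omega
  | succ fuel ih =>
    intro m acc hm
    rw [Nat.toDigitsCore]
    by_cases h2 : m / 2 = 0
    · rw [if_pos h2]
      have : m < 2 := by omega
      interval_cases m <;> simp [rawBin] <;> decide
    · rw [if_neg h2, ih (m/2) _ (by omega), if_neg h2,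
        rawBin_pos m (by omega), if_neg (show ¬ m = 0 by omega)]
      simp

theorem toBinChars_eq (x : Int) (hx : 0 ≤ x) :
    PySem.Int.toBinChars x = if x.toNat = 0 then ['0'] else rawBin x.toNat := by
  rw [PySem.Int.toBinChars, if_neg (by omega), Nat.toDigits,
    toDigitsCore_eq (x.toNat + 1) x.toNat [] (by omega)]
  simp

theorem rawBin_chars : ∀ m, ∀ c ∈ rawBin m, c = '0' ∨ c = '1' := by
  intro m
  induction m using Nat.strong_induction_on with
  | _ m ih =>
    intro c hc
    rcases Nat.eq_zero_or_pos m with h0 | h0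
    · subst h0; simp [rawBin] at hc
    · rw [rawBin_pos m h0] at hc
      rcases List.mem_append.mp hc with h | h
      · exact ih (m/2) (Nat.div_lt_self h0 (by omega)) c h
      · simp at h
        rcases Nat.mod_two_eq_zero_or_one m with h2 | h2 <;> rw [h2] at h <;> subst h
        · left; rfl
        · right; rfl

theorem zfill_eq (k m : Nat) (hk : 1 ≤ k) (hm : m < 2^k) :
    PySem.Chars.zfill (if m = 0 then ['0'] else rawBin m) ((k : Nat) : Int) = fixedBits k m := by
  rcases Nat.eq_zero_or_pos m with h0 | h0
  · subst h0
    rw [if_pos rfl]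
    simp only [PySem.Chars.zfill]
    by_cases h1 : k = 1
    · subst h1; decide
    · rw [if_neg (by simp; omega), if_neg (by decide), fixedBits_zero]
      have hkk : k = (k - 1) + 1 := by omega
      rw [hkk, List.replicate_succ']
      simp
  · rw [if_neg (by omega)]
    have hne : rawBin m ≠ [] := by rw [rawBin_pos m h0]; simp
    obtain ⟨c, rest, hcr⟩ := List.exists_cons_of_ne_nil hne
    have hc : c = '0' ∨ c = '1' := rawBin_chars m c (by rw [hcr]; exact List.mem_cons_self)
    have hlen := length_rawBin_le k m hm
    have hll : (rawBin m).length = (c :: rest).length := by rw [hcr]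
    rw [hcr]
    simp only [PySem.Chars.zfill]
    by_cases hL : (k : Int) ≤ (((c :: rest).length : Nat) : Int)
    · rw [if_pos (by simpa using hL)]
      simp only [List.length_cons] at hL hll
      rw [← hcr, ← pad_rawBin k m hm, show k - (rawBin m).length = 0 by omega]
      simp
    · rw [if_neg (by simpa using hL),
        if_neg (by rcases hc with h | h <;> subst h <;> decide), ← hcr,
        show ((k : Int)).toNat = k from by omega, ← pad_rawBin k m hm]

-- what A's conversion produces on a value that fits in k bits: the fixed k-bit string
theorem convert2binary_eq (k m : Nat) (hm : m < 2^k) :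
    convert2binary (k : Int) (m : Int) = fixedBits k m := by
  unfold convert2binary
  simp only [Int.toNat_natCast]
  rw [conv2loop_eq (m + 1) m [] (by omega), List.append_nil]
  have hlen := length_rawBin_le k m hm
  by_cases h : ((rawBin m).length : Int) = (k : Int)
  · rw [if_neg (by simpa using h), ← pad_rawBin k m hm,
      show k - (rawBin m).length = 0 by omega]
    simp
  · rw [if_pos (by simpa using h),
      show ((k : Int) - ((rawBin m).length : Int)).toNat = k - (rawBin m).length by omega,
      pad_rawBin k m hm]

theorem pyGetD_map_range {β : Type} (f : Nat → β) (m i : Nat) (d : β) (h : i < m) :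
    PySem.List.pyGetD (List.map f (List.range m)) ((i : Nat) : Int) d = f i := by
  rw [PySem.List.pyGetD_natCast, PySem.List.getD_map_range f m i d h]

theorem row_eq (k : Nat) (hk1 : 1 ≤ k) (m1 m2 : Nat) (hm1 : m1 < 2^k) (hm2 : m2 < 2^k) :
    (List.range k).map (fun j =>
      if PySem.Int.bor (if m1.testBit (k-1-j) then (1:Int) else 0)
                       (if m2.testBit (k-1-j) then (1:Int) else 0) = 0
      then ' ' else '#')
  = (PySem.Chars.zfill (PySem.Int.toBinChars (PySem.Int.bor (m1 : Int) (m2 : Int))) ((k:Nat):Int)).map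
      (fun c => if c = '1' then '#' else ' ') := by
  rw [PySem.Int.bor_natCast,
    toBinChars_eq _ (by positivity), Int.toNat_natCast,
    zfill_eq k _ hk1 (Nat.or_lt_two_pow hm1 hm2)]
  unfold fixedBits
  rw [List.map_map]
  apply List.map_congr_left
  intro j hj
  cases ht1 : m1.testBit (k-1-j) <;> cases ht2 : m2.testBit (k-1-j) <;>
    simp [Nat.testBit_or, ht1, ht2] <;> decide

-- ===== VERDICT (by name: the statement is the Claim_ definition above) =====
theorem solution_spec : Claim_equal_solution := by
  intro n arr1 arr2 hdom hpre
  obtain ⟨h1, h2, hv1, hv2⟩ := hpre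
  unfold Spec_solution solution solution_alt
  rw [PySem.List.pyRange_zero n]
  obtain ⟨k, hk⟩ : ∃ k : Nat, k = n.toNat := ⟨n.toNat, rfl⟩
  rw [← hk]
  rw [← hk] at hv1 hv2
  simp only [List.map_map]
  have hl1 : k ≤ arr1.length := by omega
  have hl2 : k ≤ arr2.length := by omega
  apply List.ext_getElem
  · simp
  · intro i hL hR
    have hik : i < k := by simpa using hL
    have hn : n = (k : Int) := by omega
    subst hn
    have hi1 : i < arr1.length := by omega
    have hi2 : i < arr2.length := by omega
    simp only [List.getElem_map, List.getElem_range, Function.comp_apply]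
    rw [pyGetD_map_range _ k i _ hik, pyGetD_map_range _ k i _ hik,
      Function.comp_apply, Function.comp_apply,
      PySem.List.pyGetD_natCast arr1 i 0, PySem.List.pyGetD_natCast arr2 i 0,
      List.getD_eq_getElem arr1 0 hi1, List.getD_eq_getElem arr2 0 hi2]
    have hmem1 : arr1[i] ∈ arr1.take k := by
      rw [show arr1[i] = (arr1.take k)[i]'(by simp; omega) from (List.getElem_take).symm]
      exact List.getElem_mem _
    have hmem2 : arr2[i] ∈ arr2.take k := by
      rw [show arr2[i] = (arr2.take k)[i]'(by simp; omega) from (List.getElem_take).symm]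
      exact List.getElem_mem _
    obtain ⟨ha0, ha1⟩ := hv1 arr1[i] hmem1
    obtain ⟨hb0, hb1⟩ := hv2 arr2[i] hmem2
    obtain ⟨m1, hm1e⟩ : ∃ m : Nat, arr1[i] = (m : Int) := ⟨arr1[i].toNat, by omega⟩
    obtain ⟨m2, hm2e⟩ : ∃ m : Nat, arr2[i] = (m : Int) := ⟨arr2[i].toNat, by omega⟩
    have hm1 : m1 < 2^k := by
      have := ha1; rw [hm1e] at this; exact_mod_cast this
    have hm2 : m2 < 2^k := by
      have := hb1; rw [hm2e] at this; exact_mod_cast this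
    rw [hm1e, hm2e, ← row_eq k (by omega) m1 m2 hm1 hm2]
    congr 1
    apply List.map_congr_left
    intro j hj
    have hjk : j < k := List.mem_range.mp hj
    simp only [Function.comp_apply]
    rw [pyGetD_map_range _ k j _ hjk, pyGetD_map_range _ k j _ hjk,
      Function.comp_apply, Function.comp_apply,
      PySem.List.pyGet?_natCast, PySem.List.pyGet?_natCast,
      convert2binary_eq k m1 hm1, convert2binary_eq k m2 hm2]
    rw [show (fixedBits k m1)[j]? = some ((fixedBits k m1)[j]'(by simp [fixedBits]; omega)) from List.getElem?_eq_getElem _,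
        show (fixedBits k m2)[j]? = some ((fixedBits k m2)[j]'(by simp [fixedBits]; omega)) from List.getElem?_eq_getElem _]
    unfold fixedBits
    simp only [List.getElem_map, List.getElem_range, Option.bind_some]
    cases ht1 : m1.testBit (k-1-j) <;>
      cases ht2 : m2.testBit (k-1-j) <;> simp [ht1, ht2] <;> decide
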